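-- pv_equiv track=rewrite | github.com/proman3419/AGH-WIET-INF-ASD-2021 | cheatsheet/graphs/bfs.py | bfs_am
-- ===== SOURCE A (Python) =====
-- from collections import deque
--
-- def bfs_am(graph, s):
--   n = len(graph)
--   queue = deque()
--   visited = [False]*n
--   # parents = [None]*n
--   # distances = [-1]*n
--
--   # distances[s] = 0
--   visited[s] = True
--   queue.append(s)
--
--   while queue:
--     u = queue.popleft()
--
--     for v in range(n):
--       if graph[u][v] == 1 and not visited[v]:
--         # parents[v] = u
--         # distances[v] = distances[u] + 1
--         visited[v] = True
--         queue.append(v)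
--
--   return visited
-- ===== SOURCE B (Python) =====
-- def bfs_am(graph, s):
--   n = len(graph)
--   visited = [False]*n
--   visited[s] = True
--   changed = True
--   while changed:
--     changed = False
--     for u in range(n):
--       if visited[u]:
--         row = graph[u]
--         for v in range(n):
--           if row[v] == 1 and not visited[v]:
--             visited[v] = True
--             changed = True
--   return visited
-- ===== Notes on version B (the rewrite author's own statement) =====
-- stated objective: alternative
-- what changed: Replaces the FIFO-queue BFS with a queue-free fixpoint saturation: repeatedly sweep all rows of already-visited vertices, marking their unmarked neighbours, until a full sweep changes nothing; only the visited mask is returned, so the result is identical.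
-- outside the precondition, e.g. on bfs_am([[0, 0], [0]], 0): A returns [True, False], B returns [True, False]
import Mathlib
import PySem

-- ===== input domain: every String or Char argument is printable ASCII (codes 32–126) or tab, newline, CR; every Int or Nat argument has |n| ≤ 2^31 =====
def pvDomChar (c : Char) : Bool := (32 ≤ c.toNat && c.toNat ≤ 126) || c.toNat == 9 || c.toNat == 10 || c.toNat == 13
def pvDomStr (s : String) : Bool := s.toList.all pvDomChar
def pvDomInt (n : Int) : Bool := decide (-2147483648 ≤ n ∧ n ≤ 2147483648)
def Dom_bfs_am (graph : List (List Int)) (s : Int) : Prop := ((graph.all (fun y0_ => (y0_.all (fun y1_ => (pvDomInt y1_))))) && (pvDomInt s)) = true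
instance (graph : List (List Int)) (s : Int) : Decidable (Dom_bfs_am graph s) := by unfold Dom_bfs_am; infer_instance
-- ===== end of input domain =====

-- B replaces A's FIFO-queue BFS by a queue-free fixpoint saturation (sweep all visited rows until
-- a full sweep changes nothing); only the visited mask is returned, so the results coincide.

-- counting helper, cited by the ports' termination proofs
theorem pvCountSet (l : List Bool) (v : Nat) (hv : v < l.length) (hf : l.getD v false = false) :
    (l.set v true).count false + 1 = l.count false := by
  induction l generalizing v with
  | nil => exact absurd hv (Nat.not_lt_zero v)
  | cons a t ih =>
    cases v with
    | zero =>
      rw [List.getD_cons_zero] at hf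
      subst hf
      rw [List.set_cons_zero, List.count_cons, List.count_cons]
      rfl
    | succ v =>
      rw [List.getD_cons_succ] at hf
      have hv' : v < t.length := Nat.lt_of_succ_lt_succ hv
      rw [List.set_cons_succ, List.count_cons, List.count_cons, Nat.add_right_comm, ih v hv' hf]

-- small helper facts cited by the ports (kept as named lemmas so the port bodies stay compact)
theorem pvCondFalse {a b : Bool} (hc : (a && !b) = true) : b = false := by
  cases b
  · rfl
  · rw [Bool.not_true, Bool.and_false] at hc
    exact absurd hc Bool.false_ne_true

theorem pvScanAProp {c la : Nat} {vis : List Bool} {v : Nat} {acc : List Int}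
    (hv : v < vis.length) (hf : vis.getD v false = false)
    (hr : c + la = (vis.set v true).count false + (acc ++ [(v : Int)]).length) :
    c + la = vis.count false + acc.length := by
  have hcount := pvCountSet vis v hv hf
  rw [List.length_append, List.length_cons, List.length_nil] at hr
  calc c + la = (vis.set v true).count false + (acc.length + (0 + 1)) := hr
    _ = ((vis.set v true).count false + (0 + 1)) + acc.length := by
          rw [Nat.add_comm acc.length (0 + 1), ← Nat.add_assoc]
    _ = vis.count false + acc.length := by rw [Nat.zero_add, hcount]

theorem pvRowBProp {C vis : List Bool} {c2 : Bool} {v : Nat}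
    (hv : v < vis.length) (hf : vis.getD v false = false)
    (h : (c2 = true ∧ C = vis.set v true) ∨
      (c2 = true ∧ C.count false < (vis.set v true).count false)) :
    c2 = true ∧ C.count false < vis.count false := by
  have hcount := pvCountSet vis v hv hf
  rcases h with ⟨h1, h2⟩ | ⟨h1, h2⟩
  · exact ⟨h1, by rw [h2]; exact hcount ▸ Nat.lt_succ_self _⟩
  · exact ⟨h1, Nat.lt_trans h2 (hcount ▸ Nat.lt_succ_self _)⟩

theorem pvBfsLoopDec {c cv la q : Nat} (h : c + la = cv + 0) :
    c + (q + la) < cv + (q + 1) := by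
  calc c + (q + la) = c + (la + q) := by rw [Nat.add_comm q la]
    _ = (c + la) + q := (Nat.add_assoc c la q).symm
    _ = cv + q := by rw [h, Nat.add_zero]
    _ < cv + (q + 1) := Nat.add_lt_add_left (Nat.lt_succ_self q) cv

theorem pvSatLoopDec {C vis : List Bool} {c2 : Bool}
    (h : (c2 = false ∧ C = vis) ∨ (c2 = true ∧ C.count false < vis.count false)) :
    C.count false + (if c2 = true then 1 else 0) <
      vis.count false + (if (true : Bool) = true then 1 else 0) := by
  rcases h with ⟨h1, h2⟩ | ⟨h1, h2⟩ <;> rw [h1]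
  · rw [h2]
    exact Nat.lt_succ_self _
  · exact Nat.add_lt_add_right h2 1

-- ===== PORT A =====
-- graph[u][v] == 1  (Python indexing; the defaults are never reached inside Pre_)
def pvAdjA (graph : List (List Int)) (u : Int) (v : Nat) : Bool :=
  (((PySem.List.pyGet? graph u).getD []).getD v 0) == 1

-- the body of A's 'for v in range(n)': marks unvisited neighbours of u and appends them to the queue;
-- the attached invariant (marked count + appended count is preserved) drives the while-loop's termination
def pvScanA (graph : List (List Int)) (n : Nat) (u : Int) (v : Nat)
    (vis : {l : List Bool // l.length = n}) (acc : List Int) :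
    {p : {l : List Bool // l.length = n} × List Int //
      p.1.1.count false + p.2.length = vis.1.count false + acc.length} :=
  if h : v < n then
    if hc : (pvAdjA graph u v && ! vis.1.getD v false) = true then
      let r := pvScanA graph n u (v+1)
        ⟨vis.1.set v true, List.length_set.trans vis.2⟩ (acc ++ [(v : Int)])
      ⟨r.1, pvScanAProp (lt_of_lt_of_eq h vis.2.symm) (pvCondFalse hc) r.2⟩
    else
      pvScanA graph n u (v+1) vis acc
  else ⟨(vis, acc), rfl⟩
  termination_by n - v
  decreasing_by all_goals exact Nat.sub_succ_lt_self n v h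

-- A's while-loop over the queue
def pvBfsLoop (graph : List (List Int)) (n : Nat) (q : List Int)
    (vis : {l : List Bool // l.length = n}) : List Bool :=
  match q with
  | [] => vis.1
  | u :: qs =>
    let r := pvScanA graph n u 0 vis []
    pvBfsLoop graph n (qs ++ r.1.2) r.1.1
  termination_by vis.1.count false + q.length
  decreasing_by
    rw [List.length_append, List.length_cons]
    exact pvBfsLoopDec (pvScanA graph n u 0 vis []).2

def bfs_am (graph : List (List Int)) (s : Int) : List Bool :=
  let n := graph.length
  -- visited = [False]*n ; visited[s] = True  (Python index, may be negative)
  let vis0 : {l : List Bool // l.length = n} :=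
    ⟨PySem.List.pySetD (List.replicate n false) s true,
      (PySem.List.length_pySetD _ _ _).trans (List.length_replicate)⟩
  -- queue.append(s); while queue: ...
  pvBfsLoop graph n [s] vis0

-- ===== PORT B =====
-- row[v] == 1 where row = graph[u], u a nonnegative loop index
def pvAdjB (graph : List (List Int)) (u : Nat) (v : Nat) : Bool :=
  ((graph.getD u []).getD v 0) == 1

-- B's inner 'for v in range(n)': marks unvisited neighbours of u, raising the changed flag
def pvRowB (graph : List (List Int)) (n : Nat) (u : Nat) (v : Nat)
    (vis : {l : List Bool // l.length = n}) (changed : Bool) :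
    {p : {l : List Bool // l.length = n} × Bool //
      (p.2 = changed ∧ p.1.1 = vis.1) ∨ (p.2 = true ∧ p.1.1.count false < vis.1.count false)} :=
  if h : v < n then
    if hc : (pvAdjB graph u v && ! vis.1.getD v false) = true then
      let r := pvRowB graph n u (v+1)
        ⟨vis.1.set v true, List.length_set.trans vis.2⟩ true
      ⟨r.1, Or.inr (pvRowBProp (lt_of_lt_of_eq h vis.2.symm) (pvCondFalse hc) r.2)⟩
    else
      pvRowB graph n u (v+1) vis changed
  else ⟨(vis, changed), Or.inl ⟨rfl, rfl⟩⟩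
  termination_by n - v
  decreasing_by all_goals exact Nat.sub_succ_lt_self n v h

-- composition of the sweep invariant, cited by pvSweepB
theorem pvCompose {A B C : List Bool} {c0 c1 c2 : Bool}
    (h1 : (c1 = c0 ∧ B = A) ∨ (c1 = true ∧ B.count false < A.count false))
    (h2 : (c2 = c1 ∧ C = B) ∨ (c2 = true ∧ C.count false < B.count false)) :
    (c2 = c0 ∧ C = A) ∨ (c2 = true ∧ C.count false < A.count false) := by
  rcases h2 with ⟨h1', h2'⟩ | ⟨h1', h2'⟩ <;> rcases h1 with ⟨g1, g2⟩ | ⟨g1, g2⟩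
  · exact Or.inl ⟨h1'.trans g1, h2'.trans g2⟩
  · exact Or.inr ⟨h1'.trans g1, by rw [h2']; exact g2⟩
  · exact Or.inr ⟨h1', by rw [g2] at h2'; exact h2'⟩
  · exact Or.inr ⟨h1', lt_trans h2' g2⟩

-- B's outer 'for u in range(n): if visited[u]: ...'
def pvSweepB (graph : List (List Int)) (n : Nat) (u : Nat)
    (vis : {l : List Bool // l.length = n}) (changed : Bool) :
    {p : {l : List Bool // l.length = n} × Bool //
      (p.2 = changed ∧ p.1.1 = vis.1) ∨ (p.2 = true ∧ p.1.1.count false < vis.1.count false)} :=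
  if h : u < n then
    if hv : vis.1.getD u false = true then
      let r := pvRowB graph n u 0 vis changed
      let r2 := pvSweepB graph n (u+1) r.1.1 r.1.2
      ⟨r2.1, pvCompose r.2 r2.2⟩
    else pvSweepB graph n (u+1) vis changed
  else ⟨(vis, changed), Or.inl ⟨rfl, rfl⟩⟩
  termination_by n - u
  decreasing_by all_goals exact Nat.sub_succ_lt_self n u h

-- B's 'while changed' saturation loop
def pvSatLoop (graph : List (List Int)) (n : Nat)
    (vis : {l : List Bool // l.length = n}) (changed : Bool) : List Bool :=
  if hch : changed = true then
    let r := pvSweepB graph n 0 vis false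
    pvSatLoop graph n r.1.1 r.1.2
  else vis.1
  termination_by vis.1.count false + (if changed = true then 1 else 0)
  decreasing_by
    rw [hch]
    exact pvSatLoopDec (pvSweepB graph n 0 vis false).2

def bfs_am_alt (graph : List (List Int)) (s : Int) : List Bool :=
  let n := graph.length
  -- visited = [False]*n ; visited[s] = True
  let vis0 : {l : List Bool // l.length = n} :=
    ⟨PySem.List.pySetD (List.replicate n false) s true,
      (PySem.List.length_pySetD _ _ _).trans (List.length_replicate)⟩
  -- changed = True ; while changed: full sweep
  pvSatLoop graph n vis0 true

-- ===== PRECONDITION & SPEC =====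
-- Pre_ excludes inputs where A raises IndexError (start index out of range, and ragged rows shorter
-- than n, which raise as soon as a visited node's short row is scanned); for ragged graphs whose short
-- rows happen to be unreachable A still returns — those accidental returns are excluded too (see cites).
def Pre_bfs_am (graph : List (List Int)) (s : Int) : Prop :=
  (-(graph.length : Int) ≤ s ∧ s < (graph.length : Int)) ∧
    ∀ row ∈ graph, graph.length ≤ row.length
instance (graph : List (List Int)) (s : Int) : Decidable (Pre_bfs_am graph s) := by
  unfold Pre_bfs_am; infer_instance

def pvWitness_bfs_am : List (List Int) × Int := ([[0, 1], [0, 0]], 0)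

def Spec_bfs_am (graph : List (List Int)) (s : Int) (out : List Bool) : Prop := out = bfs_am_alt graph s
instance (graph : List (List Int)) (s : Int) (out : List Bool) : Decidable (Spec_bfs_am graph s out) := by unfold Spec_bfs_am; infer_instance

-- ===== CLAIM (what is proved, stated in full; the proofs are below) =====
def Claim_equal_bfs_am : Prop := ∀ (graph : List (List Int)) (s : Int), Dom_bfs_am graph s → Pre_bfs_am graph s → Spec_bfs_am graph s (bfs_am graph s)

-- ===== LEMMAS AND PROOFS =====

-- reachability in graph restricted to vertices < n, from source s0
inductive pvReach (graph : List (List Int)) (n : Nat) (s0 : Nat) : Nat → Prop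
  | base : pvReach graph n s0 s0
  | step {u v : Nat} : pvReach graph n s0 u → v < n → pvAdjB graph u v = true → pvReach graph n s0 v

-- the normalized (Python wraparound) start index
def pvIdx0 (n : Nat) (s : Int) : Nat := if 0 ≤ s then s.toNat else n - (-s).toNat

theorem pvIdx0_lt (n : Nat) (s : Int) (h1 : -(n : Int) ≤ s) (h2 : s < (n : Int)) :
    pvIdx0 n s < n := by
  unfold pvIdx0; split <;> omega

theorem pvSetD_eq (n : Nat) (s : Int) (h1 : -(n : Int) ≤ s) (h2 : s < (n : Int)) (l : List Bool)
    (hl : l.length = n) :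
    PySem.List.pySetD l s true = l.set (pvIdx0 n s) true := by
  simp only [PySem.List.pySetD, PySem.List.pySet?, PySem.List.pyIdx?, pvIdx0, hl]
  by_cases hs : 0 ≤ s
  · rw [if_pos hs, if_pos h2, if_pos hs]; rfl
  · rw [if_neg hs, if_neg hs, if_pos h1]; rfl

theorem pvGet?_eq (g : List (List Int)) (s : Int) (h1 : -(g.length : Int) ≤ s)
    (h2 : s < (g.length : Int)) :
    PySem.List.pyGet? g s = g[pvIdx0 g.length s]? := by
  unfold pvIdx0
  by_cases hs : 0 ≤ s
  · rw [PySem.List.pyGet?_of_nonneg g hs, if_pos hs]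
  · have hk : s = -(((-s).toNat : Nat) : Int) := by omega
    rw [if_neg hs, hk, PySem.List.pyGet?_neg_natCast g (-s).toNat (by omega) (by omega)]
    simp
    have hmax : (max (-s) 0).toNat = (-s).toNat := by omega
    rw [hmax]

-- the two adjacency readings agree on a natural index
theorem pvAdj_eq (g : List (List Int)) (j v : Nat) : pvAdjA g (j : Int) v = pvAdjB g j v := by
  unfold pvAdjA pvAdjB
  rw [PySem.List.pyGet?_of_nonneg g (Int.natCast_nonneg j)]
  simp only [Int.toNat_natCast, ← List.getD_eq_getElem?_getD]

-- getD through List.set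
theorem pvGetD_set (l : List Bool) (v i : Nat) (b : Bool) (hv : v < l.length) :
    (l.set v b).getD i false = if i = v then b else l.getD i false := by
  by_cases hiv : i = v
  · subst hiv
    rw [List.getD_eq_getElem?_getD, List.getElem?_set_self hv]
    simp
  · rw [List.getD_eq_getElem?_getD, List.getElem?_set_ne (by omega : v ≠ i),
      ← List.getD_eq_getElem?_getD, if_neg hiv]

-- ---- characterisation of A's inner scan: marks ----
theorem pvScanA_getD (g : List (List Int)) (n : Nat) (u : Int)
    (v : Nat) (vis : {l : List Bool // l.length = n}) (acc : List Int) (i : Nat) :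
      (pvScanA g n u v vis acc).1.1.1.getD i false =
        (vis.1.getD i false || (decide (v ≤ i) && decide (i < n) && pvAdjA g u i)) := by
  fun_induction pvScanA g n u v vis acc with
  | case1 v vis acc hlt hcond r ih =>
    dsimp only at ih ⊢
    rw [ih, pvGetD_set vis.1 v i true (by rw [vis.2]; exact hlt)]
    rcases Bool.and_eq_true_iff.mp hcond with ⟨hadj, hget⟩
    by_cases hiv : i = v
    · subst hiv
      simp [hadj, hlt]
    · rw [if_neg hiv]
      have hd : decide (v + 1 ≤ i) = decide (v ≤ i) := decide_eq_decide.mpr (by omega)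
      rw [hd]
  | case2 v vis acc hlt hcond ih =>
    rw [ih]
    by_cases hiv : i = v
    · subst hiv
      have h1 : decide (i + 1 ≤ i) = false := by simp
      have h2 : decide (i ≤ i) = true := by simp
      rw [h1, h2]
      cases hvg : vis.1.getD i false
      · have hadj : pvAdjA g u i = false := by
          by_contra hh
          have hat : pvAdjA g u i = true := by revert hh; cases (pvAdjA g u i) <;> simp
          exact hcond (by rw [hat, hvg]; rfl)
        simp [hadj, hvg]
      · simp [hvg]
    · have hd : decide (v + 1 ≤ i) = decide (v ≤ i) := decide_eq_decide.mpr (by omega)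
      rw [hd]
  | case3 v vis acc hge =>
    dsimp only
    have hb : (decide (v ≤ i) && decide (i < n)) = false := by
      by_cases h1 : v ≤ i <;> by_cases h2 : i < n <;> simp [h1, h2] <;> omega
    rw [hb]
    simp

-- a true getD entry lies inside the list
theorem pvGetD_lt (l : List Bool) (i : Nat) (h : l.getD i false = true) : i < l.length := by
  by_contra hn
  rw [List.getD_eq_getElem?_getD, List.getElem?_eq_none_iff.mpr (by omega)] at h
  simp at h

-- ---- characterisation of A's inner scan: appended queue entries ----
theorem pvScanA_acc (g : List (List Int)) (n : Nat) (u : Int)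
    (v : Nat) (vis : {l : List Bool // l.length = n}) (acc : List Int) (x : Int) :
      x ∈ (pvScanA g n u v vis acc).1.2 ↔
        (x ∈ acc ∨ ∃ j : Nat, x = (j : Int) ∧ v ≤ j ∧ j < n ∧ pvAdjA g u j = true ∧
          vis.1.getD j false = false) := by
  fun_induction pvScanA g n u v vis acc with
  | case1 v vis acc hlt hcond r ih =>
    dsimp only at ih ⊢
    rw [ih]
    rcases Bool.and_eq_true_iff.mp hcond with ⟨hadj, hget⟩
    have hget' : vis.1.getD v false = false := by simpa using hget
    constructor
    · rintro (hx | ⟨j, rfl, hj1, hj2, hj3, hj4⟩)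
      · rcases List.mem_append.mp hx with h | h
        · exact Or.inl h
        · have : x = ((v : Nat) : Int) := by simpa using h
          exact Or.inr ⟨v, this, le_refl v, hlt, hadj, hget'⟩
      · refine Or.inr ⟨j, rfl, by omega, hj2, hj3, ?_⟩
        rw [pvGetD_set vis.1 v j true (by rw [vis.2]; exact hlt), if_neg (by omega)] at hj4
        exact hj4
    · rintro (hx | ⟨j, rfl, hj1, hj2, hj3, hj4⟩)
      · exact Or.inl (List.mem_append.mpr (Or.inl hx))
      · by_cases hjv : j = v
        · subst hjv
          exact Or.inl (List.mem_append.mpr (Or.inr (by simp)))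
        · refine Or.inr ⟨j, rfl, by omega, hj2, hj3, ?_⟩
          rw [pvGetD_set vis.1 v j true (by rw [vis.2]; exact hlt), if_neg hjv]
          exact hj4
  | case2 v vis acc hlt hcond ih =>
    rw [ih]
    constructor
    · rintro (hx | ⟨j, rfl, hj1, hj2, hj3, hj4⟩)
      · exact Or.inl hx
      · exact Or.inr ⟨j, rfl, by omega, hj2, hj3, hj4⟩
    · rintro (hx | ⟨j, rfl, hj1, hj2, hj3, hj4⟩)
      · exact Or.inl hx
      · by_cases hjv : j = v
        · subst hjv
          exfalso
          apply hcond
          rw [hj3, hj4]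
          rfl
        · exact Or.inr ⟨j, rfl, by omega, hj2, hj3, hj4⟩
  | case3 v vis acc hge =>
    dsimp only
    constructor
    · intro hx; exact Or.inl hx
    · rintro (hx | ⟨j, rfl, hj1, hj2, hj3, hj4⟩)
      · exact hx
      · omega

-- the scan depends on u only through the row graph[u]
theorem pvScanA_congr (g : List (List Int)) (n : Nat) (u1 u2 : Int)
    (hadj : ∀ w, pvAdjA g u1 w = pvAdjA g u2 w) (v : Nat)
    (vis : {l : List Bool // l.length = n}) (acc : List Int) :
    (pvScanA g n u1 v vis acc).1 = (pvScanA g n u2 v vis acc).1 := by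
  fun_induction pvScanA g n u1 v vis acc with
  | case1 v vis acc hlt hcond r ih =>
    have hc2 : (pvAdjA g u2 v && ! vis.1.getD v false) = true := by
      rw [← hadj v]; exact hcond
    conv_rhs => rw [pvScanA.eq_def]
    rw [dif_pos hlt, dif_pos hc2]
    exact ih
  | case2 v vis acc hlt hcond ih =>
    have hc2 : ¬ (pvAdjA g u2 v && ! vis.1.getD v false) = true := by
      rw [← hadj v]; exact hcond
    conv_rhs => rw [pvScanA.eq_def]
    rw [dif_pos hlt, dif_neg hc2]
    exact ih
  | case3 v vis acc hge =>
    conv_rhs => rw [pvScanA.eq_def]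
    rw [dif_neg hge]

theorem pvBfsLoop_length (g : List (List Int)) (n : Nat) (q : List Int)
    (vis : {l : List Bool // l.length = n}) : (pvBfsLoop g n q vis).length = n := by
  fun_induction pvBfsLoop g n q vis with
  | case1 vis => exact vis.2
  | case2 vis u qs r ih => exact ih

-- ---- the BFS loop computes exactly the reachable set ----
theorem pvBfsLoop_correct (g : List (List Int)) (n : Nat) (s0 : Nat)
    (q : List Int) (vis : {l : List Bool // l.length = n}) :
    (∀ u ∈ q, ∃ j : Nat, u = (j : Int) ∧ vis.1.getD j false = true) →
    (∀ i : Nat, vis.1.getD i false = true → pvReach g n s0 i) →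
    (∀ i : Nat, vis.1.getD i false = true → ((i : Int) ∉ q) →
        ∀ w : Nat, w < n → pvAdjB g i w = true → vis.1.getD w false = true) →
    vis.1.getD s0 false = true →
    ∀ i : Nat, ((pvBfsLoop g n q vis).getD i false = true ↔ (i < n ∧ pvReach g n s0 i)) := by
  fun_induction pvBfsLoop g n q vis with
  | case1 vis =>
    intro _ hsound hclosed hs0 i
    constructor
    · intro hm
      refine ⟨?_, hsound i hm⟩
      have hlt := pvGetD_lt vis.1 i hm
      rw [vis.2] at hlt
      exact hlt
    · rintro ⟨hin, hr⟩
      clear hin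
      induction hr with
      | base => exact hs0
      | @step u' v' hu hvn hadj ihr =>
        exact hclosed u' ihr (List.not_mem_nil) v' hvn hadj
  | case2 vis u qs r ih =>
    intro hq hsound hclosed hs0
    obtain ⟨j, hj, hjm⟩ := hq u (List.mem_cons_self)
    subst hj
    apply ih
    · intro x hx
      rcases List.mem_append.mp hx with hx | hx
      · obtain ⟨j', hj', hm'⟩ := hq x (List.mem_cons_of_mem _ hx)
        exact ⟨j', hj', by rw [pvScanA_getD, hm']; rfl⟩
      · rcases (pvScanA_acc g n _ 0 vis [] x).mp hx with h | ⟨j', rfl, _, hj2, hj3, hj4⟩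
        · simp at h
        · refine ⟨j', rfl, ?_⟩
          rw [pvScanA_getD]
          simp [hj2, hj3]
    · intro i hi
      rw [pvScanA_getD] at hi
      rcases Bool.or_eq_true_iff.mp hi with h | h
      · exact hsound i h
      · rcases Bool.and_eq_true_iff.mp h with ⟨hb, hadj⟩
        rcases Bool.and_eq_true_iff.mp hb with ⟨-, hlt⟩
        have hlt' : i < n := of_decide_eq_true hlt
        rw [pvAdj_eq] at hadj
        exact pvReach.step (hsound j hjm) hlt' hadj
    · intro i hi hnotin w hw hadjw
      rw [pvScanA_getD]
      by_cases hvis : vis.1.getD i false = true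
      · by_cases hij : i = j
        · subst hij
          rw [← pvAdj_eq] at hadjw
          simp [hadjw, hw]
        · have hninq : ((i : Int)) ∉ (j : Int) :: qs := by
            intro hmem
            rcases List.mem_cons.mp hmem with h | h
            · exact hij (by exact_mod_cast h)
            · exact hnotin (List.mem_append.mpr (Or.inl h))
          rw [hclosed i hvis hninq w hw hadjw]
          rfl
      · exfalso
        rw [pvScanA_getD] at hi
        rcases Bool.or_eq_true_iff.mp hi with h | h
        · exact hvis h
        · rcases Bool.and_eq_true_iff.mp h with ⟨hb, hadj⟩
          rcases Bool.and_eq_true_iff.mp hb with ⟨-, hlt⟩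
          apply hnotin
          refine List.mem_append.mpr (Or.inr ?_)
          refine (pvScanA_acc g n _ 0 vis [] (i : Int)).mpr (Or.inr ?_)
          exact ⟨i, rfl, Nat.zero_le i, of_decide_eq_true hlt, hadj, by simpa using hvis⟩
    · rw [pvScanA_getD, hs0]
      rfl

-- ---- characterisation of B's inner row loop ----
theorem pvRowB_getD (g : List (List Int)) (n : Nat) (u : Nat) (v : Nat)
    (vis : {l : List Bool // l.length = n}) (changed : Bool) (i : Nat) :
    (pvRowB g n u v vis changed).1.1.1.getD i false =
      (vis.1.getD i false || (decide (v ≤ i) && decide (i < n) && pvAdjB g u i)) := by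
  fun_induction pvRowB g n u v vis changed with
  | case1 v vis changed hlt hcond r ih =>
    dsimp only at ih ⊢
    rw [ih, pvGetD_set vis.1 v i true (by rw [vis.2]; exact hlt)]
    rcases Bool.and_eq_true_iff.mp hcond with ⟨hadj, hget⟩
    by_cases hiv : i = v
    · subst hiv
      simp [hadj, hlt]
    · rw [if_neg hiv]
      have hd : decide (v + 1 ≤ i) = decide (v ≤ i) := decide_eq_decide.mpr (by omega)
      rw [hd]
  | case2 v vis changed hlt hcond ih =>
    rw [ih]
    by_cases hiv : i = v
    · subst hiv
      have h1 : decide (i + 1 ≤ i) = false := by simp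
      have h2 : decide (i ≤ i) = true := by simp
      rw [h1, h2]
      cases hvg : vis.1.getD i false
      · have hadj : pvAdjB g u i = false := by
          by_contra hh
          have hat : pvAdjB g u i = true := by revert hh; cases (pvAdjB g u i) <;> simp
          exact hcond (by rw [hat, hvg]; rfl)
        simp [hadj, hvg]
      · simp [hvg]
    · have hd : decide (v + 1 ≤ i) = decide (v ≤ i) := decide_eq_decide.mpr (by omega)
      rw [hd]
  | case3 v vis changed hge =>
    dsimp only
    have hb : (decide (v ≤ i) && decide (i < n)) = false := by
      by_cases h1 : v ≤ i <;> by_cases h2 : i < n <;> simp [h1, h2] <;> omega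
    rw [hb]
    simp

-- if the row scan did not raise the changed flag, every neighbour of u was already visited
theorem pvRowB_false (g : List (List Int)) (n : Nat) (u : Nat) (v : Nat)
    (vis : {l : List Bool // l.length = n}) (ch : Bool) :
    (pvRowB g n u v vis ch).1.2 = false →
      ∀ w, v ≤ w → w < n → pvAdjB g u w = true → vis.1.getD w false = true := by
  fun_induction pvRowB g n u v vis ch with
  | case1 v vis ch hlt hcond r ih =>
    intro hf
    exfalso
    have hr := r.2
    have hf' : r.1.2 = false := hf
    rcases hr with ⟨h1, -⟩ | ⟨h1, -⟩ <;> rw [h1] at hf' <;> simp at hf'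
  | case2 v vis ch hlt hcond ih =>
    intro hf w hvw hwn hadj
    by_cases hwv : w = v
    · subst hwv
      cases hvg : vis.1.getD w false
      · exact absurd (by rw [hadj, hvg]; rfl) hcond
      · rfl
    · exact ih hf w (by omega) hwn hadj
  | case3 v vis ch hge =>
    intro hf w hvw hwn hadj
    omega

-- the sweep only adds marks
theorem pvSweepB_mono (g : List (List Int)) (n : Nat) (u : Nat)
    (vis : {l : List Bool // l.length = n}) (ch : Bool) (i : Nat) :
    vis.1.getD i false = true → (pvSweepB g n u vis ch).1.1.1.getD i false = true := by
  fun_induction pvSweepB g n u vis ch with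
  | case1 u vis ch hlt hv r r2 iha ihb =>
    intro hm
    dsimp only at iha ⊢
    apply iha
    rw [pvRowB_getD, hm]
    rfl
  | case2 u vis ch hlt hv ih => exact ih
  | case3 u vis ch hge => exact id

-- every mark the sweep adds is reachable from an already-reachable vertex
theorem pvSweepB_sound (g : List (List Int)) (n : Nat) (s0 : Nat) (u : Nat)
    (vis : {l : List Bool // l.length = n}) (ch : Bool) :
    (∀ i, vis.1.getD i false = true → pvReach g n s0 i) →
    ∀ i, (pvSweepB g n u vis ch).1.1.1.getD i false = true → pvReach g n s0 i := by
  fun_induction pvSweepB g n u vis ch with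
  | case1 u vis ch hlt hv r r2 iha ihb =>
    intro hsound i hi
    dsimp only at iha hi
    refine iha ?_ i hi
    intro i' hi'
    rw [pvRowB_getD] at hi'
    rcases Bool.or_eq_true_iff.mp hi' with h | h
    · exact hsound i' h
    · rcases Bool.and_eq_true_iff.mp h with ⟨hb, hadj⟩
      rcases Bool.and_eq_true_iff.mp hb with ⟨-, hltw⟩
      exact pvReach.step (hsound u hv) (of_decide_eq_true hltw) hadj
  | case2 u vis ch hlt hv ih => exact ih
  | case3 u vis ch hge => intro hsound i hi; exact hsound i hi

-- a sweep that ends with the changed flag still down found every visited row saturated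
theorem pvSweepB_false (g : List (List Int)) (n : Nat) (u : Nat)
    (vis : {l : List Bool // l.length = n}) (ch : Bool) :
    (pvSweepB g n u vis ch).1.2 = false →
    ∀ w, u ≤ w → w < n → vis.1.getD w false = true →
    ∀ t, t < n → pvAdjB g w t = true → vis.1.getD t false = true := by
  fun_induction pvSweepB g n u vis ch with
  | case1 u vis ch hlt hv r r2 iha ihb =>
    intro hf w huw hwn hwm t htn hadj
    have hf2 : r2.1.2 = false := hf
    have hrch : r.1.2 = false := by
      rcases r2.2 with ⟨h1, -⟩ | ⟨h1, -⟩
      · rw [h1] at hf2; exact hf2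
      · rw [h1] at hf2; simp at hf2
    have hveq : r.1.1.1 = vis.1 := by
      rcases r.2 with ⟨-, h2⟩ | ⟨h1, -⟩
      · exact h2
      · rw [h1] at hrch; simp at hrch
    by_cases hwu : w = u
    · subst hwu
      exact pvRowB_false g n w 0 vis ch hrch t (Nat.zero_le t) htn hadj
    · have hwm' : r.1.1.1.getD w false = true := by rw [hveq]; exact hwm
      have hres := iha hf2 w (by omega) hwn hwm' t htn hadj
      rw [hveq] at hres
      exact hres
  | case2 u vis ch hlt hv ih =>
    intro hf w huw hwn hwm t htn hadj
    by_cases hwu : w = u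
    · subst hwu
      exact absurd hwm hv
    · exact ih hf w (by omega) hwn hwm t htn hadj
  | case3 u vis ch hge =>
    intro hf w huw hwn
    omega

theorem pvSatLoop_length (g : List (List Int)) (n : Nat)
    (vis : {l : List Bool // l.length = n}) (ch : Bool) :
    (pvSatLoop g n vis ch).length = n := by
  fun_induction pvSatLoop g n vis ch with
  | case1 vis r ih => exact ih
  | case2 vis ch hch => exact vis.2

-- ---- the saturation loop computes exactly the reachable set ----
theorem pvSatLoop_correct (g : List (List Int)) (n : Nat) (s0 : Nat)
    (vis : {l : List Bool // l.length = n}) (ch : Bool) :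
    (∀ i, vis.1.getD i false = true → pvReach g n s0 i) →
    vis.1.getD s0 false = true →
    (ch = false → ∀ w, w < n → vis.1.getD w false = true →
      ∀ t, t < n → pvAdjB g w t = true → vis.1.getD t false = true) →
    ∀ i, ((pvSatLoop g n vis ch).getD i false = true ↔ (i < n ∧ pvReach g n s0 i)) := by
  fun_induction pvSatLoop g n vis ch with
  | case1 vis r ih =>
    intro hsound hs0 _
    apply ih
    · exact pvSweepB_sound g n s0 0 vis false hsound
    · exact pvSweepB_mono g n 0 vis false s0 hs0
    · intro hf w hwn hwm t htn hadj
      have hveq : r.1.1.1 = vis.1 := by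
        rcases r.2 with ⟨-, h2⟩ | ⟨h1, -⟩
        · exact h2
        · rw [h1] at hf; simp at hf
      have hwm' : vis.1.getD w false = true := by rw [hveq] at hwm; exact hwm
      have hres := pvSweepB_false g n 0 vis false hf w (Nat.zero_le w) hwn hwm' t htn hadj
      rw [hveq]
      exact hres
  | case2 vis ch hch =>
    intro hsound hs0 hclosed i
    have hchf : ch = false := by
      cases ch
      · rfl
      · exact absurd rfl hch
    constructor
    · intro hm
      refine ⟨?_, hsound i hm⟩
      have hlt := pvGetD_lt vis.1 i hm
      rw [vis.2] at hlt
      exact hlt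
    · rintro ⟨hin, hr⟩
      clear hin
      induction hr with
      | base => exact hs0
      | @step u' v' hu hvn hadj ihr =>
        have hu'n : u' < n := by
          have := pvGetD_lt vis.1 u' ihr
          rw [vis.2] at this
          exact this
        exact hclosed hchf u' hu'n ihr v' hvn hadj

-- the freshly initialised visited list marks exactly the start vertex
theorem pvInit_getD (n s0 i : Nat) (h : s0 < n) :
    (((List.replicate n false).set s0 true).getD i false = true) ↔ i = s0 := by
  rw [pvGetD_set (List.replicate n false) s0 i true (by simpa using h)]
  by_cases his : i = s0
  · simp [his]
  · rw [if_neg his]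
    simp only [List.getD_eq_getElem?_getD]
    constructor
    · intro hx
      exfalso
      by_cases hin : i < n
      · rw [List.getElem?_eq_getElem (by simpa using hin)] at hx
        simp at hx
      · rw [List.getElem?_eq_none_iff.mpr (by simpa using hin)] at hx
        simp at hx
    · intro hx
      exact absurd hx his

-- ===== VERDICT (by name: the statement is the Claim_ definition above) =====
theorem bfs_am_spec : Claim_equal_bfs_am := by
  intro graph s _ hpre
  unfold Spec_bfs_am
  obtain ⟨⟨h1, h2⟩, -⟩ := hpre
  have hs0n : pvIdx0 graph.length s < graph.length := pvIdx0_lt graph.length s h1 h2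
  have hrepl : (List.replicate graph.length false).length = graph.length := by simp
  -- the two (identical) initialisations, normalised to the wrapped start index
  have e1 : (⟨PySem.List.pySetD (List.replicate graph.length false) s true,
        by simp [PySem.List.length_pySetD]⟩ : {l : List Bool // l.length = graph.length}) =
      (⟨(List.replicate graph.length false).set (pvIdx0 graph.length s) true,
        by simp⟩ : {l : List Bool // l.length = graph.length}) :=
    Subtype.ext (pvSetD_eq graph.length s h1 h2 _ hrepl)
  have hm : ((List.replicate graph.length false).set (pvIdx0 graph.length s) true).getD
      (pvIdx0 graph.length s) false = true :=
    (pvInit_getD graph.length (pvIdx0 graph.length s) (pvIdx0 graph.length s) hs0n).mpr rfl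
  have hadjall : ∀ w, pvAdjA graph s w = pvAdjA graph ((pvIdx0 graph.length s : Nat) : Int) w := by
    intro w
    unfold pvAdjA
    rw [pvGet?_eq graph s h1 h2, PySem.List.pyGet?_of_nonneg graph
      (Int.natCast_nonneg (pvIdx0 graph.length s)), Int.toNat_natCast]
  -- A's side equals the BFS loop on the normalised start queue
  have eA : bfs_am graph s =
      pvBfsLoop graph graph.length [((pvIdx0 graph.length s : Nat) : Int)]
        ⟨(List.replicate graph.length false).set (pvIdx0 graph.length s) true, by simp⟩ := by
    calc bfs_am graph s
        = pvBfsLoop graph graph.length [s]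
            ⟨PySem.List.pySetD (List.replicate graph.length false) s true,
              by simp [PySem.List.length_pySetD]⟩ := rfl
      _ = pvBfsLoop graph graph.length [s]
            ⟨(List.replicate graph.length false).set (pvIdx0 graph.length s) true, by simp⟩ := by
              rw [e1]
      _ = pvBfsLoop graph graph.length [((pvIdx0 graph.length s : Nat) : Int)]
            ⟨(List.replicate graph.length false).set (pvIdx0 graph.length s) true, by simp⟩ := by
              conv_lhs => rw [pvBfsLoop]
              conv_rhs => rw [pvBfsLoop]
              rw [pvScanA_congr graph graph.length s _ hadjall 0 _ []]
  have eB : bfs_am_alt graph s =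
      pvSatLoop graph graph.length
        ⟨(List.replicate graph.length false).set (pvIdx0 graph.length s) true, by simp⟩ true := by
    calc bfs_am_alt graph s
        = pvSatLoop graph graph.length
            ⟨PySem.List.pySetD (List.replicate graph.length false) s true,
              by simp [PySem.List.length_pySetD]⟩ true := rfl
      _ = _ := by rw [e1]
  have hA := pvBfsLoop_correct graph graph.length (pvIdx0 graph.length s)
    [((pvIdx0 graph.length s : Nat) : Int)]
    ⟨(List.replicate graph.length false).set (pvIdx0 graph.length s) true, by simp⟩
    (by
      intro u hu
      have hu' : u = ((pvIdx0 graph.length s : Nat) : Int) := by simpa using hu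
      exact ⟨pvIdx0 graph.length s, hu', hm⟩)
    (by
      intro i hi
      have := (pvInit_getD graph.length (pvIdx0 graph.length s) i hs0n).mp hi
      subst this
      exact pvReach.base)
    (by
      intro i hi hnot
      have := (pvInit_getD graph.length (pvIdx0 graph.length s) i hs0n).mp hi
      subst this
      exact absurd (by simp) hnot)
    hm
  have hB := pvSatLoop_correct graph graph.length (pvIdx0 graph.length s)
    ⟨(List.replicate graph.length false).set (pvIdx0 graph.length s) true, by simp⟩ true
    (by
      intro i hi
      have := (pvInit_getD graph.length (pvIdx0 graph.length s) i hs0n).mp hi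
      subst this
      exact pvReach.base)
    hm
    (by intro h; simp at h)
  rw [eA, eB]
  apply List.ext_getElem
  · rw [pvBfsLoop_length, pvSatLoop_length]
  · intro i hiA hiB
    have hAi := hA i
    have hBi := hB i
    rw [List.getD_eq_getElem _ _ hiA] at hAi
    rw [List.getD_eq_getElem _ _ hiB] at hBi
    have hiff := hAi.trans hBi.symm
    cases hx : (pvBfsLoop graph graph.length [((pvIdx0 graph.length s : Nat) : Int)]
        ⟨(List.replicate graph.length false).set (pvIdx0 graph.length s) true, by simp⟩)[i] <;>
      cases hy : (pvSatLoop graph graph.length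
        ⟨(List.replicate graph.length false).set (pvIdx0 graph.length s) true, by simp⟩ true)[i] <;>
      simp_all
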